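-- pv_equiv track=rewrite | github.com/kouq7802/Zahl | RepeatingDecimal.py | find_recurring_cycle
-- ===== SOURCE A (Python) =====
-- def find_recurring_cycle(n, dividend):
--     rabbit = dividend
--     turtle = dividend
--     s = 0
--     g = 0
--
--     while True:
--         rabbit = (rabbit * 10) % n
--         rabbit = (rabbit * 10) % n
--         turtle = (turtle * 10) % n
--         if rabbit == turtle:
--             break
--         else:
--             continue
--
--     if rabbit != 0:
--         rabbit = dividend
--         s = 1
--         while turtle != rabbit:
--             s += 1
--             turtle = (turtle * 10) % n
--             rabbit = (rabbit * 10) % n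
--
--         rabbit = (rabbit *10) % n
--         g = s
--
--         while turtle != rabbit:
--             g += 1
--             rabbit = (rabbit * 10) % n
--
--     return {'n':n, 'startpoint':s, 'endpoint':g}
-- ===== SOURCE B (Python) =====
-- def find_recurring_cycle(n, dividend):
--     seen = {dividend: 0}
--     r = dividend
--     k = 0
--     while True:
--         r = (r * 10) % n
--         k += 1
--         if r == 0:
--             return {'n': n, 'startpoint': 0, 'endpoint': 0}
--         if r in seen:
--             return {'n': n, 'startpoint': seen[r] + 1, 'endpoint': k}
--         seen[r] = k
-- ===== Notes on version B (the rewrite author's own statement) =====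
-- stated objective: simpler
-- what changed: Replaces Floyd's three-phase tortoise-and-hare cycle detection with a single linear pass that records each remainder's first-seen index in a dict and reads start/end of the cycle directly off the first repeated remainder.
import Mathlib
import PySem

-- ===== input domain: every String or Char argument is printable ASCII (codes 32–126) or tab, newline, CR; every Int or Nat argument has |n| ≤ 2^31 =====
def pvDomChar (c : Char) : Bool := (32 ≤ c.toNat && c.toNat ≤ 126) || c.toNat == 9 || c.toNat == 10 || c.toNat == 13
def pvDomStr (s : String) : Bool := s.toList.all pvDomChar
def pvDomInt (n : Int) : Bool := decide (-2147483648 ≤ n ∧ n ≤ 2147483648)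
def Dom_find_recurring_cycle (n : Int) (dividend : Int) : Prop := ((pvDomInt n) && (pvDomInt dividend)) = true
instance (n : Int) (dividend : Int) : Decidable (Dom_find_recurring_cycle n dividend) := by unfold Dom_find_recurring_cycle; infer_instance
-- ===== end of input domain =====

-- B replaces A's three-phase Floyd cycle detection by one linear pass over the remainder
-- sequence that stores each remainder's first-seen index in a dict (same values, one loop).


-- fuel bound for the while-True loops (a totality guard only: proved sufficient below)
def pvFuel (n : Int) : Nat := 8 * n.natAbs + 16

-- ===== PORT A =====
-- while True: rabbit two steps, turtle one step, break when equal
def pvFloyd (n : Int) : Nat → Int → Int → Int × Int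
  | 0, rabbit, turtle => (rabbit, turtle)
  | fuel+1, rabbit, turtle =>
      let rabbit := PySem.Int.mod (rabbit * 10) n
      let rabbit := PySem.Int.mod (rabbit * 10) n
      let turtle := PySem.Int.mod (turtle * 10) n
      if rabbit = turtle then (rabbit, turtle) else pvFloyd n fuel rabbit turtle

-- while turtle != rabbit: s += 1; both step   (returns (s, turtle, rabbit))
def pvPhase2 (n : Int) : Nat → Int → Int → Int → Int × Int × Int
  | 0, s, turtle, rabbit => (s, turtle, rabbit)
  | fuel+1, s, turtle, rabbit =>
      if turtle = rabbit then (s, turtle, rabbit)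
      else pvPhase2 n fuel (s + 1) (PySem.Int.mod (turtle * 10) n) (PySem.Int.mod (rabbit * 10) n)

-- while turtle != rabbit: g += 1; rabbit steps   (returns g)
def pvPhase3 (n : Int) : Nat → Int → Int → Int → Int
  | 0, g, _, _ => g
  | fuel+1, g, turtle, rabbit =>
      if turtle = rabbit then g
      else pvPhase3 n fuel (g + 1) turtle (PySem.Int.mod (rabbit * 10) n)

def find_recurring_cycle (n : Int) (dividend : Int) : List (String × Int) :=
  let p := pvFloyd n (pvFuel n) dividend dividend
  if p.1 ≠ 0 then
    let q := pvPhase2 n (pvFuel n) 1 p.2 dividend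
    let s := q.1
    let rabbit := PySem.Int.mod (q.2.2 * 10) n
    let g := pvPhase3 n (pvFuel n) s q.2.1 rabbit
    [("n", n), ("startpoint", s), ("endpoint", g)]
  else
    [("n", n), ("startpoint", 0), ("endpoint", 0)]

-- ===== PORT B =====
-- single pass: r steps once per iteration; dict 'seen' maps remainder -> first index
def pvScan (n : Int) : Nat → PySem.Dict Int Int → Int → Int → Int × Int
  | 0, _, _, _ => (0, 0)
  | fuel+1, seen, r, k =>
      let r := PySem.Int.mod (r * 10) n
      let k := k + 1
      if r = 0 then (0, 0)
      else
        match seen.get? r with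
        | some j => (j + 1, k)
        | none => pvScan n fuel (seen.insert r k) r k

def pvFuelB (n : Int) : Nat := 4 * n.natAbs + 4

def find_recurring_cycle_alt (n : Int) (dividend : Int) : List (String × Int) :=
  let p := pvScan n (pvFuelB n) ((PySem.Dict.empty).insert dividend 0) dividend 0
  [("n", n), ("startpoint", p.1), ("endpoint", p.2)]

-- ===== PRECONDITION & SPEC =====
-- Pre_ excludes exactly n = 0, where Python A raises ZeroDivisionError (B raises there too).
def Pre_find_recurring_cycle (n : Int) (dividend : Int) : Prop := n ≠ 0
instance (n : Int) (dividend : Int) : Decidable (Pre_find_recurring_cycle n dividend) := by unfold Pre_find_recurring_cycle; infer_instance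

def pvWitness_find_recurring_cycle : Int × Int := (7, 1)

def Spec_find_recurring_cycle (n : Int) (dividend : Int) (out : List (String × Int)) : Prop := out = find_recurring_cycle_alt n dividend
instance (n : Int) (dividend : Int) (out : List (String × Int)) : Decidable (Spec_find_recurring_cycle n dividend out) := by unfold Spec_find_recurring_cycle; infer_instance

-- ===== CLAIM (what is proved, stated in full; the proofs are below) =====
def Claim_equal_find_recurring_cycle : Prop := ∀ (n : Int) (dividend : Int), Dom_find_recurring_cycle n dividend → Pre_find_recurring_cycle n dividend → Spec_find_recurring_cycle n dividend (find_recurring_cycle n dividend)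

-- ===== LEMMAS AND PROOFS =====

-- the remainder sequence X k both programs walk: X 0 = dividend, X (k+1) = (X k * 10) % n
def pvSeq (n d : Int) : Nat → Int
  | 0 => d
  | k+1 => PySem.Int.mod (pvSeq n d k * 10) n

-- the dict B has built after k loop iterations (no overwrite happens before the first repeat)
def pvSeen (n d : Int) : Nat → PySem.Dict Int Int
  | 0 => (PySem.Dict.empty).insert d 0
  | k+1 => (pvSeen n d k).insert (pvSeq n d (k+1)) ((k : Int) + 1)

lemma pvSeq_shift (n d : Int) (a t : Nat) : pvSeq n (pvSeq n d a) t = pvSeq n d (a + t) := by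
  induction t with
  | zero => rfl
  | succ t ih => simp [pvSeq, ih]

lemma pvSeq_bounds (n d : Int) (hn : n ≠ 0) (k : Nat) :
    -(n.natAbs : Int) < pvSeq n d (k+1) ∧ pvSeq n d (k+1) < (n.natAbs : Int) := by
  simp only [pvSeq]
  rcases lt_or_gt_of_ne hn with hneg | hpos
  · obtain ⟨h1, h2⟩ := PySem.Int.mod_neg_bounds (pvSeq n d k * 10) hneg
    omega
  · have h1 := PySem.Int.mod_nonneg (pvSeq n d k * 10) hpos
    have h2 := PySem.Int.mod_lt (pvSeq n d k * 10) hpos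
    omega

lemma pvSeq_zero_stay (n d : Int) (k t : Nat) (h : pvSeq n d k = 0) : pvSeq n d (k + t) = 0 := by
  induction t with
  | zero => exact h
  | succ t ih =>
    have : k + (t + 1) = (k + t) + 1 := by omega
    rw [this]
    simp only [pvSeq, ih]
    rw [show (0 : Int) * 10 = 0 by ring, PySem.Int.mod_eq_zero_iff_dvd]
    exact dvd_zero n

-- pigeonhole: a repeat occurs among X 1 .. X (2|n|+1)
lemma pvSeq_exists_repeat (n d : Int) (hn : n ≠ 0) :
    ∃ i j, 1 ≤ i ∧ i < j ∧ j ≤ 2 * n.natAbs + 1 ∧ pvSeq n d i = pvSeq n d j := by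
  have hN : 1 ≤ n.natAbs := by omega
  have hmaps : ∀ i ∈ Finset.Icc 1 (2 * n.natAbs + 1), pvSeq n d i ∈ Finset.Ioo (-(n.natAbs : Int)) (n.natAbs : Int) := by
    intro i hi
    simp only [Finset.mem_Icc] at hi
    obtain ⟨k, rfl⟩ : ∃ k, i = k + 1 := ⟨i - 1, by omega⟩
    have := pvSeq_bounds n d hn k
    simp only [Finset.mem_Ioo]
    exact this
  have hcard : (Finset.Ioo (-(n.natAbs : Int)) (n.natAbs : Int)).card < (Finset.Icc 1 (2 * n.natAbs + 1)).card := by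
    rw [Int.card_Ioo, Nat.card_Icc]
    omega
  obtain ⟨i, hi, j, hj, hne, heq⟩ := Finset.exists_ne_map_eq_of_card_lt_of_maps_to hcard hmaps
  simp only [Finset.mem_Icc] at hi hj
  rcases lt_or_gt_of_ne hne with h | h
  · exact ⟨i, j, hi.1, h, hj.2, heq⟩
  · exact ⟨j, i, hj.1, h, hi.2, heq.symm⟩

def pvHasPer (n d : Int) (i : Nat) : Prop := ∃ p, 0 < p ∧ pvSeq n d (i + p) = pvSeq n d i

-- periodicity propagates forward
lemma pvSeq_per (n d : Int) (μ lam : Nat) (hper : pvSeq n d (μ + lam) = pvSeq n d μ) :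
    ∀ t k, μ ≤ t → pvSeq n d (t + k * lam) = pvSeq n d t := by
  have hstep : ∀ t, μ ≤ t → pvSeq n d (t + lam) = pvSeq n d t := by
    intro t ht
    obtain ⟨s, rfl⟩ := Nat.exists_eq_add_of_le ht
    have h1 := pvSeq_shift n d (μ + lam) s
    have h2 := pvSeq_shift n d μ s
    rw [hper] at h1
    rw [h2] at h1
    rw [show μ + s + lam = μ + lam + s by omega, ← h1]
  intro t k ht
  induction k with
  | zero => simp
  | succ k ih =>
    rw [show t + (k+1) * lam = (t + k * lam) + lam by ring]
    rw [hstep _ (by omega), ih]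

-- master characterisation: any equality X a = X b (a<b) happens inside the cycle, at a multiple of lam
lemma pvSeq_char (n d : Int) (μ lam : Nat) (hlam : 0 < lam)
    (hper : pvSeq n d (μ + lam) = pvSeq n d μ)
    (hμmin : ∀ m, m < μ → ¬ pvHasPer n d m)
    (hlammin : ∀ p, 0 < p → pvSeq n d (μ + p) = pvSeq n d μ → lam ≤ p) :
    ∀ a b, a < b → pvSeq n d a = pvSeq n d b → μ ≤ a ∧ lam ∣ (b - a) := by
  intro a b hab heq
  have hba : a + (b - a) = b := by omega
  have hper' : pvSeq n d (a + (b - a)) = pvSeq n d a := by rw [hba, heq]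
  have hμa : μ ≤ a := by
    by_contra h
    exact hμmin a (by omega) ⟨b - a, by omega, hper'⟩
  refine ⟨hμa, ?_⟩
  set q := (b - a) / lam with hq
  set r := (b - a) % lam with hr
  have hdm : lam * q + r = b - a := Nat.div_add_mod (b - a) lam
  have hrlt : r < lam := Nat.mod_lt _ hlam
  set t := μ + a * lam with hts
  have h1 : pvSeq n d (t + 1 * (b - a)) = pvSeq n d t :=
    pvSeq_per n d a (b - a) hper' t 1 (by
      have : a ≤ a * lam := Nat.le_mul_of_pos_right a hlam
      omega)
  have h2 : pvSeq n d (μ + a * lam) = pvSeq n d μ := pvSeq_per n d μ lam hper μ a le_rfl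
  have h4 : pvSeq n d ((μ + r) + (a + q) * lam) = pvSeq n d (μ + r) :=
    pvSeq_per n d μ lam hper (μ + r) (a + q) (by omega)
  have h3 : t + 1 * (b - a) = (μ + r) + (a + q) * lam := by
    simp only [hts]
    ring_nf
    omega
  have hkey : pvSeq n d (μ + r) = pvSeq n d μ := by
    rw [← h4, ← h3, h1, hts, h2]
  rcases Nat.eq_zero_or_pos r with h0 | hpos
  · exact Nat.dvd_of_mod_eq_zero h0
  · exact absurd (hlammin r hpos hkey) (by omega)

lemma pvSeq_zero_mu (n d : Int) (μ lam : Nat) (hlam : 0 < lam)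
    (hper : pvSeq n d (μ + lam) = pvSeq n d μ)
    (hμmin : ∀ m, m < μ → ¬ pvHasPer n d m)
    (k : Nat) (h : pvSeq n d k = 0) : pvSeq n d μ = 0 := by
  have hstay := pvSeq_zero_stay n d k
  have hμk : μ ≤ k := by
    by_contra hlt
    refine hμmin k (by omega) ⟨1, one_pos, ?_⟩
    have h1 : pvSeq n d (k + 1) = 0 := hstay 1 h
    rw [h1, h]
  have hge : k ≤ μ + k * lam := by
    have : k ≤ k * lam := Nat.le_mul_of_pos_right k hlam
    omega
  have h1 : pvSeq n d (μ + k * lam) = pvSeq n d μ := pvSeq_per n d μ lam hper μ k le_rfl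
  have h2 : pvSeq n d (k + (μ + k * lam - k)) = 0 := hstay _ h
  rw [show k + (μ + k * lam - k) = μ + k * lam by omega] at h2
  rw [← h1, h2]

-- ----- loop characterisations -----

lemma pvFloyd_run (n d : Int) (M : Nat) (hM1 : 1 ≤ M)
    (hMeet : pvSeq n d (2*M) = pvSeq n d M)
    (hMmin : ∀ m, 1 ≤ m → m < M → pvSeq n d (2*m) ≠ pvSeq n d m) :
    ∀ fuel k, k < M → M - k ≤ fuel →
      pvFloyd n fuel (pvSeq n d (2*k)) (pvSeq n d k) = (pvSeq n d M, pvSeq n d M) := by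
  intro fuel
  induction fuel with
  | zero => intro k hk hf; omega
  | succ f ih =>
    intro k hk hf
    simp only [pvFloyd]
    rw [show PySem.Int.mod (pvSeq n d (2*k) * 10) n = pvSeq n d (2*k+1) from rfl]
    rw [show PySem.Int.mod (pvSeq n d (2*k+1) * 10) n = pvSeq n d (2*(k+1)) from
      (by rw [show 2*(k+1) = (2*k+1)+1 by ring]; rfl)]
    rw [show PySem.Int.mod (pvSeq n d k * 10) n = pvSeq n d (k+1) from rfl]
    by_cases h : pvSeq n d (2*(k+1)) = pvSeq n d (k+1)
    · have hkM : k + 1 = M := by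
        by_contra hne
        exact hMmin (k+1) (by omega) (by omega) h
      rw [if_pos h, hkM, hMeet]
    · have hlt : k + 1 < M := by
        rcases Nat.lt_or_ge (k+1) M with h' | h'
        · exact h'
        · have : k + 1 = M := by omega
          rw [this] at h
          exact absurd hMeet h
      rw [if_neg h]
      exact ih (k+1) hlt (by omega)

lemma pvPhase2_run (n d : Int) (M μ : Nat)
    (heq : pvSeq n d (M + μ) = pvSeq n d μ)
    (hne : ∀ u, u < μ → pvSeq n d (M + u) ≠ pvSeq n d u) :
    ∀ fuel t, t ≤ μ → μ - t ≤ fuel →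
      pvPhase2 n fuel ((t : Int) + 1) (pvSeq n d (M + t)) (pvSeq n d t)
        = ((μ : Int) + 1, pvSeq n d μ, pvSeq n d μ) := by
  intro fuel
  induction fuel with
  | zero =>
    intro t ht hf
    have : t = μ := by omega
    subst this
    simp only [pvPhase2]
    rw [heq]
  | succ f ih =>
    intro t ht hf
    simp only [pvPhase2]
    by_cases h : pvSeq n d (M + t) = pvSeq n d t
    · have : t = μ := by
        rcases Nat.lt_or_ge t μ with h' | h'
        · exact absurd h (hne t h')
        · omega
      subst this
      rw [if_pos h, heq]
    · have htlt : t < μ := by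
        rcases Nat.lt_or_ge t μ with h' | h'
        · exact h'
        · have : t = μ := by omega
          subst this
          exact absurd heq h
      rw [if_neg h]
      rw [show PySem.Int.mod (pvSeq n d (M + t) * 10) n = pvSeq n d (M + (t+1)) from
        (by rw [show M + (t+1) = (M+t)+1 by ring]; rfl)]
      rw [show PySem.Int.mod (pvSeq n d t * 10) n = pvSeq n d (t+1) from rfl]
      have := ih (t+1) (by omega) (by omega)
      rw [show ((t:Int)+1)+1 = (((t+1):Nat):Int)+1 by push_cast; ring]
      exact this

lemma pvPhase3_run (n d : Int) (μ lam : Nat)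
    (hcyc : pvSeq n d (μ + lam) = pvSeq n d μ)
    (hnemid : ∀ u, 1 ≤ u → u < lam → pvSeq n d (μ + u) ≠ pvSeq n d μ) :
    ∀ fuel u, 1 ≤ u → u ≤ lam → lam - u ≤ fuel →
      pvPhase3 n fuel ((μ : Int) + u) (pvSeq n d μ) (pvSeq n d (μ + u)) = (μ : Int) + lam := by
  intro fuel
  induction fuel with
  | zero =>
    intro u hu1 hu2 hf
    have : u = lam := by omega
    subst this
    simp only [pvPhase3]
  | succ f ih =>
    intro u hu1 hu2 hf
    simp only [pvPhase3]
    by_cases h : pvSeq n d μ = pvSeq n d (μ + u)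
    · have : u = lam := by
        rcases Nat.lt_or_ge u lam with h' | h'
        · exact absurd h.symm (hnemid u hu1 h')
        · omega
      subst this
      rw [if_pos h]
    · have hult : u < lam := by
        rcases Nat.lt_or_ge u lam with h' | h'
        · exact h'
        · have : u = lam := by omega
          subst this
          exact absurd hcyc.symm h
      rw [if_neg h]
      rw [show PySem.Int.mod (pvSeq n d (μ + u) * 10) n = pvSeq n d (μ + (u+1)) from
        (by rw [show μ + (u+1) = (μ+u)+1 by ring]; rfl)]
      have := ih (u+1) (by omega) (by omega) (by omega)
      rw [show ((μ:Int)+u)+1 = (μ:Int)+((u+1:Nat):Int) by push_cast; ring]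
      exact this

lemma pvSeen_get_none (n d : Int) (k : Nat) (v : Int)
    (h : ∀ j, j ≤ k → pvSeq n d j ≠ v) : (pvSeen n d k).get? v = none := by
  induction k with
  | zero =>
    simp only [pvSeen]
    rw [PySem.Dict.get?_insert]
    rw [if_neg (fun hh => h 0 le_rfl hh.symm)]
    exact PySem.Dict.get?_empty v
  | succ k ih =>
    simp only [pvSeen]
    rw [PySem.Dict.get?_insert]
    rw [if_neg (fun hh => h (k+1) le_rfl hh.symm)]
    exact ih (fun j hj => h j (by omega))

lemma pvSeen_get_some (n d : Int) (k j : Nat) (hj : j ≤ k)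
    (hdist : ∀ i j', i < j' → j' ≤ k → pvSeq n d i ≠ pvSeq n d j') :
    (pvSeen n d k).get? (pvSeq n d j) = some (j : Int) := by
  induction k with
  | zero =>
    have : j = 0 := by omega
    subst this
    simp only [pvSeen, pvSeq]
    rw [PySem.Dict.get?_insert, if_pos rfl]
    norm_num
  | succ k ih =>
    simp only [pvSeen]
    rcases Nat.lt_or_ge j (k+1) with hlt | hge
    · rw [PySem.Dict.get?_insert]
      rw [if_neg (fun hh => hdist j (k+1) hlt le_rfl hh)]
      exact ih (by omega) (fun i j' hij hj' => hdist i j' hij (by omega))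
    · have : j = k + 1 := by omega
      subst this
      rw [PySem.Dict.get?_insert, if_pos rfl]
      norm_num

lemma pvScan_run (n d : Int) (K : Nat) (hK : 1 ≤ K)
    (hnz : ∀ j, 1 ≤ j → j < K → pvSeq n d j ≠ 0)
    (hdist : ∀ i j, i < j → j < K → pvSeq n d i ≠ pvSeq n d j)
    (out : Int × Int)
    (hout : (pvSeq n d K = 0 ∧ out = (0, 0)) ∨
            (pvSeq n d K ≠ 0 ∧ ∃ j₀, j₀ < K ∧ pvSeq n d j₀ = pvSeq n d K ∧
              out = ((j₀ : Int) + 1, (K : Int)))) :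
    ∀ fuel k, k < K → K - k ≤ fuel →
      pvScan n fuel (pvSeen n d k) (pvSeq n d k) (k : Int) = out := by
  intro fuel
  induction fuel with
  | zero => intro k hk hf; omega
  | succ f ih =>
    intro k hk hf
    simp only [pvScan]
    rw [show PySem.Int.mod (pvSeq n d k * 10) n = pvSeq n d (k+1) from rfl]
    rcases Nat.lt_or_ge (k+1) K with hlt | hge
    · rw [if_neg (hnz (k+1) (by omega) hlt)]
      have hnone : (pvSeen n d k).get? (pvSeq n d (k+1)) = none :=
        pvSeen_get_none n d k _ (fun j hj hh => hdist j (k+1) (by omega) hlt hh)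
      rw [hnone]
      have := ih (k+1) hlt (by omega)
      rw [show (k:Int)+1 = ((k+1:Nat):Int) by push_cast; ring]
      exact this
    · have hkK : k + 1 = K := by omega
      rcases hout with ⟨hz, hozero⟩ | ⟨hnzK, j₀, hj₀, hjeq, ho⟩
      · rw [hkK, if_pos hz, hozero]
      · rw [hkK, if_neg hnzK]
        have hsome : (pvSeen n d k).get? (pvSeq n d K) = some (j₀ : Int) := by
          rw [← hjeq]
          exact pvSeen_get_some n d k j₀ (by omega)
            (fun i j' hij hj' => hdist i j' hij (by omega))
        rw [hsome, ho]
        rw [show (k:Int)+1 = ((K:Nat):Int) by rw [← hkK]; push_cast; ring]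

-- ===== VERDICT (by name: the statement is the Claim_ definition above) =====
theorem find_recurring_cycle_spec : Claim_equal_find_recurring_cycle := by
  intro n d _ hn
  unfold Spec_find_recurring_cycle
  obtain ⟨i0, j0, hi1, hij, hjb, heq0⟩ := pvSeq_exists_repeat n d hn
  have hNE : {m | pvHasPer n d m}.Nonempty :=
    ⟨i0, j0 - i0, by omega, by rw [show i0 + (j0 - i0) = j0 by omega]; exact heq0.symm⟩
  obtain ⟨μ, hμmem, hμmin'⟩ := wellFounded_lt.has_min _ hNE
  have hμmin : ∀ m, m < μ → ¬ pvHasPer n d m := fun m hm hp => hμmin' m hp hm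
  obtain ⟨p0, hp0, hp0e⟩ := hμmem
  obtain ⟨lam, ⟨hlam, hper⟩, hlammin'⟩ :=
    wellFounded_lt.has_min {p | 0 < p ∧ pvSeq n d (μ + p) = pvSeq n d μ} ⟨p0, hp0, hp0e⟩
  have hlammin : ∀ p, 0 < p → pvSeq n d (μ + p) = pvSeq n d μ → lam ≤ p :=
    fun p hp he => Nat.le_of_not_lt (hlammin' p ⟨hp, he⟩)
  have char := pvSeq_char n d μ lam hlam hper hμmin hlammin
  obtain ⟨hμi0, hdvd0⟩ := char i0 j0 hij heq0
  have hlamb : lam ≤ 2 * n.natAbs := by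
    have := Nat.le_of_dvd (by omega) hdvd0
    omega
  have hμb : μ ≤ 2 * n.natAbs := by omega
  -- a meeting point for the hare and tortoise, with a bound
  have hdmμ := Nat.div_add_mod μ lam
  have hmlμ := Nat.mod_lt μ hlam
  set m0 := lam * (μ / lam + 1) with hm0def
  have hm0e : m0 = lam * (μ / lam) + lam := by rw [hm0def]; ring
  have hμm0 : μ < m0 := by omega
  have hm01 : 1 ≤ m0 := by omega
  have hm0b : m0 ≤ μ + lam := by omega
  have hm0meet : pvSeq n d (2 * m0) = pvSeq n d m0 := by
    have := pvSeq_per n d μ lam hper m0 (μ / lam + 1) (by omega)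
    rw [show m0 + (μ / lam + 1) * lam = 2 * m0 by rw [hm0def]; ring] at this
    exact this
  obtain ⟨M, ⟨hM1, hMeet⟩, hMmin'⟩ :=
    wellFounded_lt.has_min {m | 1 ≤ m ∧ pvSeq n d (2*m) = pvSeq n d m} ⟨m0, hm01, hm0meet⟩
  have hMmin : ∀ m, 1 ≤ m → m < M → pvSeq n d (2*m) ≠ pvSeq n d m :=
    fun m h1 hm he => hMmin' m ⟨h1, he⟩ hm
  have hMb : M ≤ μ + lam := Nat.le_trans (Nat.le_of_not_lt (hMmin' m0 ⟨hm01, hm0meet⟩)) hm0b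
  obtain ⟨hμM, hdvdM⟩ : μ ≤ M ∧ lam ∣ M := by
    have h := char M (2*M) (by omega) hMeet.symm
    rwa [show 2*M - M = M by omega] at h
  have hfloyd : pvFloyd n (pvFuel n) d d = (pvSeq n d M, pvSeq n d M) := by
    have := pvFloyd_run n d M hM1 hMeet hMmin (pvFuel n) 0 (by omega)
      (by unfold pvFuel; omega)
    simpa [pvSeq] using this
  by_cases hz : pvSeq n d μ = 0
  · -- terminating decimal: the cycle is {0}
    have hXM : pvSeq n d M = 0 := by
      have := pvSeq_zero_stay n d μ (M - μ) hz
      rwa [show μ + (M - μ) = M by omega] at this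
    have hA : find_recurring_cycle n d = [("n", n), ("startpoint", 0), ("endpoint", 0)] := by
      unfold find_recurring_cycle
      rw [hfloyd]
      simp [hXM]
    rw [hA]
    by_cases hμ0 : μ = 0
    · have hd0 : pvSeq n d 0 = 0 := by rw [← hμ0]; exact hz
      have hscan := pvScan_run n d 1 le_rfl (by omega) (by omega) (0, 0)
        (Or.inl ⟨pvSeq_zero_stay n d 0 1 hd0, rfl⟩) (pvFuelB n) 0 (by omega)
        (by unfold pvFuelB; omega)
      have hscan' : pvScan n (pvFuelB n) ((PySem.Dict.empty).insert d 0) d 0 = (0, 0) := by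
        simpa [pvSeen, pvSeq] using hscan
      unfold find_recurring_cycle_alt
      rw [hscan']
    · have hnzB : ∀ j, 1 ≤ j → j < μ → pvSeq n d j ≠ 0 := by
        intro j h1 hj he
        refine hμmin j hj ⟨1, one_pos, ?_⟩
        rw [pvSeq_zero_stay n d j 1 he, he]
      have hdistB : ∀ i j, i < j → j < μ → pvSeq n d i ≠ pvSeq n d j := by
        intro i j hij hj he
        have := (char i j hij he).1
        omega
      have hscan := pvScan_run n d μ (by omega) hnzB hdistB (0, 0)
        (Or.inl ⟨hz, rfl⟩) (pvFuelB n) 0 (by omega) (by unfold pvFuelB; omega)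
      have hscan' : pvScan n (pvFuelB n) ((PySem.Dict.empty).insert d 0) d 0 = (0, 0) := by
        simpa [pvSeen, pvSeq] using hscan
      unfold find_recurring_cycle_alt
      rw [hscan']
  · -- a genuine nonzero cycle
    have hXMnz : pvSeq n d M ≠ 0 :=
      fun h => hz (pvSeq_zero_mu n d μ lam hlam hper hμmin M h)
    obtain ⟨c, hc⟩ := hdvdM
    have heq2 : pvSeq n d (M + μ) = pvSeq n d μ := by
      have := pvSeq_per n d μ lam hper μ c le_rfl
      rwa [show μ + c * lam = M + μ by rw [hc]; ring] at this
    have hne2 : ∀ u, u < μ → pvSeq n d (M + u) ≠ pvSeq n d u := by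
      intro u hu he
      have := (char u (M + u) (by omega) he.symm).1
      omega
    have hph2 : pvPhase2 n (pvFuel n) 1 (pvSeq n d M) d
        = ((μ : Int) + 1, pvSeq n d μ, pvSeq n d μ) := by
      have := pvPhase2_run n d M μ heq2 hne2 (pvFuel n) 0 (by omega)
        (by unfold pvFuel; omega)
      simpa [pvSeq] using this
    have hnemid : ∀ u, 1 ≤ u → u < lam → pvSeq n d (μ + u) ≠ pvSeq n d μ :=
      fun u h1 hu he => absurd (hlammin u (by omega) he) (by omega)
    have hph3 : pvPhase3 n (pvFuel n) ((μ : Int) + 1) (pvSeq n d μ) (pvSeq n d (μ + 1))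
        = (μ : Int) + lam := by
      have := pvPhase3_run n d μ lam hper hnemid (pvFuel n) 1 le_rfl (by omega)
        (by unfold pvFuel; omega)
      simpa using this
    have hA : find_recurring_cycle n d
        = [("n", n), ("startpoint", (μ : Int) + 1), ("endpoint", (μ : Int) + (lam : Int))] := by
      unfold find_recurring_cycle
      rw [hfloyd]
      simp only [ne_eq]
      rw [if_pos hXMnz]
      rw [hph2]
      rw [show PySem.Int.mod (pvSeq n d μ * 10) n = pvSeq n d (μ + 1) from rfl]
      rw [hph3]
    have hnzB : ∀ j, 1 ≤ j → j < μ + lam → pvSeq n d j ≠ 0 :=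
      fun j h1 hj he => hz (pvSeq_zero_mu n d μ lam hlam hper hμmin j he)
    have hdistB : ∀ i j, i < j → j < μ + lam → pvSeq n d i ≠ pvSeq n d j := by
      intro i j hij hj he
      obtain ⟨h1, h2⟩ := char i j hij he
      have := Nat.le_of_dvd (by omega) h2
      omega
    have hKnz : pvSeq n d (μ + lam) ≠ 0 := fun h => hz (hper ▸ h)
    have hscan := pvScan_run n d (μ + lam) (by omega) hnzB hdistB
      (((μ : Int) + 1, ((μ + lam : Nat) : Int)))
      (Or.inr ⟨hKnz, μ, by omega, hper.symm, rfl⟩) (pvFuelB n) 0 (by omega)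
      (by unfold pvFuelB; omega)
    have hscan' : pvScan n (pvFuelB n) ((PySem.Dict.empty).insert d 0) d 0
        = ((μ : Int) + 1, (μ : Int) + (lam : Int)) := by
      have h2 : ((μ + lam : Nat) : Int) = (μ : Int) + (lam : Int) := by push_cast; ring
      rw [← h2]
      simpa [pvSeen, pvSeq] using hscan
    rw [hA]
    unfold find_recurring_cycle_alt
    rw [hscan']
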